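-- pv_equiv track=rewrite | github.com/dongpham120899/LabelVariation_SciIE | preprocessing/analysis_json.py | co_appearance
-- ===== SOURCE A (Python) =====
-- def co_appearance(col1, col2):
--     n11 = 0
--     n10 = 0
--     n01 = 0
--     n00 = 0
--     for i in range(len(col1)):
--         if col1[i]==col2[i]==1:
--             n11 += 1
--         elif col1[i]==1 and col2[i]==0:
--             n10 += 1
--         elif col1[i]==0 and col2[i]==1:
--             n01 += 1
--         elif col1[i]==0 and col2[i]==0:
--             n00 += 1
--
--     return n11, n10, n01, n00
-- ===== SOURCE B (Python) =====
-- def co_appearance(col1, col2):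
--     pairs = list(zip(col1, col2))
--     return (pairs.count((1, 1)), pairs.count((1, 0)),
--             pairs.count((0, 1)), pairs.count((0, 0)))
-- ===== Notes on version B (the rewrite author's own statement) =====
-- stated objective: idiomatic
-- what changed: B pairs the columns once with zip and then answers each of the four cells by list.count, replacing A's indexed single pass with a four-way if/elif branch and four running counters.
import Mathlib
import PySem

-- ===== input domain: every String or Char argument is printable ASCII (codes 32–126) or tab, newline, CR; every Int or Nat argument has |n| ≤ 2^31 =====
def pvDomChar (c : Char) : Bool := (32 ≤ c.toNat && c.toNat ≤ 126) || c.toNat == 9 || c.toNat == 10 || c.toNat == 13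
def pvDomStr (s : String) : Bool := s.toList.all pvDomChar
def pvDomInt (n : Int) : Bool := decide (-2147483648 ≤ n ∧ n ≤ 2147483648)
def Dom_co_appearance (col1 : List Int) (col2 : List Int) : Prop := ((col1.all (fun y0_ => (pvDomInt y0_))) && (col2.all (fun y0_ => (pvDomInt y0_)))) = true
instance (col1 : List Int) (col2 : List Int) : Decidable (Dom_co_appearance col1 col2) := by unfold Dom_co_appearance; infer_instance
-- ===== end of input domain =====

-- B pairs the columns with zip once and reads each of the four cells off with list.count
-- (four counting passes), replacing A's indexed single pass with a four-way branch
-- (objective: idiomatic; same O(n) cost).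


-- ===== PORT A =====
def co_appearance (col1 : List Int) (col2 : List Int) : Int × Int × Int × Int :=
  (PySem.List.pyRange 0 (PySem.List.len col1) 1).foldl
    (fun s i =>
      let x1 := PySem.List.pyGetD col1 i 0
      let x2 := PySem.List.pyGetD col2 i 0
      if x1 = x2 ∧ x2 = 1 then (s.1 + 1, s.2.1, s.2.2.1, s.2.2.2)
      else if x1 = 1 ∧ x2 = 0 then (s.1, s.2.1 + 1, s.2.2.1, s.2.2.2)
      else if x1 = 0 ∧ x2 = 1 then (s.1, s.2.1, s.2.2.1 + 1, s.2.2.2)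
      else if x1 = 0 ∧ x2 = 0 then (s.1, s.2.1, s.2.2.1, s.2.2.2 + 1)
      else s)
    (0, 0, 0, 0)

-- ===== PORT B =====
def co_appearance_alt (col1 : List Int) (col2 : List Int) : Int × Int × Int × Int :=
  let pairs := col1.zip col2
  ((PySem.List.count pairs (1, 1) : Int), (PySem.List.count pairs (1, 0) : Int),
   (PySem.List.count pairs (0, 1) : Int), (PySem.List.count pairs (0, 0) : Int))

-- ===== PRECONDITION & SPEC =====
-- Python A raises IndexError (col2[i]) when col1 is longer than col2; exactly those inputs are excluded.
def Pre_co_appearance (col1 : List Int) (col2 : List Int) : Prop := col1.length ≤ col2.length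
instance (col1 : List Int) (col2 : List Int) : Decidable (Pre_co_appearance col1 col2) := by unfold Pre_co_appearance; infer_instance
def pvWitness_co_appearance : List Int × List Int := ([1, 0, 1, 2], [1, 1, 0, 0])

def Spec_co_appearance (col1 : List Int) (col2 : List Int) (out : Int × Int × Int × Int) : Prop := out = co_appearance_alt col1 col2
instance (col1 : List Int) (col2 : List Int) (out : Int × Int × Int × Int) : Decidable (Spec_co_appearance col1 col2 out) := by unfold Spec_co_appearance; infer_instance

-- ===== CLAIM (what is proved, stated in full; the proofs are below) =====
def Claim_equal_co_appearance : Prop := ∀ (col1 : List Int) (col2 : List Int), Dom_co_appearance col1 col2 → Pre_co_appearance col1 col2 → Spec_co_appearance col1 col2 (co_appearance col1 col2)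

-- ===== LEMMAS AND PROOFS =====

-- A's loop body, as a function of the pair of column entries at index i.
def stepZ (s : Int × Int × Int × Int) (p : Int × Int) : Int × Int × Int × Int :=
  if p.1 = p.2 ∧ p.2 = 1 then (s.1 + 1, s.2.1, s.2.2.1, s.2.2.2)
  else if p.1 = 1 ∧ p.2 = 0 then (s.1, s.2.1 + 1, s.2.2.1, s.2.2.2)
  else if p.1 = 0 ∧ p.2 = 1 then (s.1, s.2.1, s.2.2.1 + 1, s.2.2.2)
  else if p.1 = 0 ∧ p.2 = 0 then (s.1, s.2.1, s.2.2.1, s.2.2.2 + 1)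
  else s

-- With col1 no longer than col2, A's indexed loop is a fold of stepZ over the zip of the columns.
theorem fold_A_eq_zip (col1 col2 : List Int) (h : col1.length ≤ col2.length) :
    co_appearance col1 col2 = (col1.zip col2).foldl stepZ (0, 0, 0, 0) := by
  unfold co_appearance
  have hz : (col1.zip col2).length = col1.length := by
    simp [List.length_zip]; omega
  have hlen : PySem.List.len col1 = PySem.List.len (col1.zip col2) := by
    simp [hz]
  rw [hlen]
  rw [PySem.List.foldl_congr_mem _ _
        (fun s i => stepZ s (PySem.List.pyGetD (col1.zip col2) i ((0 : Int), (0 : Int)))) _ ?_]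
  · exact PySem.List.foldl_pyRange_zero_pyGetD (col1.zip col2) ((0 : Int), (0 : Int)) stepZ (0, 0, 0, 0)
  · intro acc i hi
    rw [PySem.List.mem_pyRange_one] at hi
    have hi2 : i < ((col1.zip col2).length : Int) := by
      simpa using hi.2
    have hb1 : i < (col1.length : Int) := by omega
    have hb2 : i < (col2.length : Int) := by
      push_cast at hb1 ⊢; omega
    have h1 := PySem.List.pyGetD_eq_getElem col1 (0 : Int) hi.1 hb1
    have h2 := PySem.List.pyGetD_eq_getElem col2 (0 : Int) hi.1 hb2
    have h3 := PySem.List.pyGetD_eq_getElem (col1.zip col2) ((0 : Int), (0 : Int)) hi.1 hi2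
    simp only [h1, h2, h3, List.getElem_zip, stepZ]

-- The fold of stepZ counts the four key pairs.
theorem countsZ (L : List (Int × Int)) : ∀ s : Int × Int × Int × Int,
    L.foldl stepZ s =
      (s.1 + (List.count ((1:Int),(1:Int)) L : Int),
       s.2.1 + (List.count ((1:Int),(0:Int)) L : Int),
       s.2.2.1 + (List.count ((0:Int),(1:Int)) L : Int),
       s.2.2.2 + (List.count ((0:Int),(0:Int)) L : Int)) := by
  induction L with
  | nil => intro s; simp
  | cons p L ih =>
    intro s
    obtain ⟨x, y⟩ := p
    simp only [List.foldl_cons, ih, List.count_cons, stepZ]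
    by_cases h11 : x = y ∧ y = 1
    · obtain ⟨rfl, rfl⟩ := h11
      simp
      ring
    · by_cases h10 : x = 1 ∧ y = 0
      · obtain ⟨rfl, rfl⟩ := h10; simp; ring
      · by_cases h01 : x = 0 ∧ y = 1
        · obtain ⟨rfl, rfl⟩ := h01; simp; ring
        · by_cases h00 : x = 0 ∧ y = 0
          · obtain ⟨rfl, rfl⟩ := h00; simp; ring
          · have e11 : ¬ ((x, y) = ((1:Int), (1:Int))) := by
              simp only [Prod.mk.injEq]; omega
            have e10 : ¬ ((x, y) = ((1:Int), (0:Int))) := by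
              simp only [Prod.mk.injEq]; omega
            have e01 : ¬ ((x, y) = ((0:Int), (1:Int))) := by
              simp only [Prod.mk.injEq]; omega
            have e00 : ¬ ((x, y) = ((0:Int), (0:Int))) := by
              simp only [Prod.mk.injEq]; omega
            simp [h11, h10, h01, h00, e11, e10, e01, e00]

-- ===== VERDICT (by name: the statement is the Claim_ definition above) =====
theorem co_appearance_spec : Claim_equal_co_appearance := by
  intro col1 col2 _ hpre
  unfold Spec_co_appearance co_appearance_alt
  rw [fold_A_eq_zip col1 col2 hpre, countsZ]
  simp [PySem.List.count_eq]
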